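-- pv_equiv track=rewrite | github.com/hasegaw/IkaLog | ikalog/utils/character_recoginizer/character.py | cut
-- ===== SOURCE A (Python) =====
-- def cut(img, img_hist_x):
--     chars = []
--     in_char = False
--     x_start = None
--     last_x = None
--
--     for x in range(len(img_hist_x)):
--         if in_char:
--             if img_hist_x[x] > 0:
--                 continue
--             else:
--                 char = (x_start, x - 1)
--                 if char[1] - char[0] > 2:
--                     chars.append((x_start, x - 1))
--                 in_char = False
--         else:
--             if img_hist_x[x] > 0:
--                 x_start = x
--                 in_char = True
--             else:
--                 continue
--
--     return chars
-- ===== SOURCE B (Python) =====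
-- def cut(img, img_hist_x):
--     pos = [i for i, v in enumerate(img_hist_x) if v > 0]
--     runs = []
--     k = 0
--     while k < len(pos):
--         s = e = pos[k]
--         while k + 1 < len(pos) and pos[k + 1] == e + 1:
--             k += 1
--             e = pos[k]
--         runs.append((s, e))
--         k += 1
--     return [(s, e) for s, e in runs if e - s > 2]
-- ===== Notes on version B (the rewrite author's own statement) =====
-- stated objective: simpler
-- what changed: Instead of A's stateful in_char/x_start scan, B collects the positive indices, groups them into maximal consecutive runs, and keeps the runs longer than 3 with a final filter.
-- intended difference: When the histogram ends with a positive run of length >= 4, A returns the list without that final character (its scan only records a run when a non-positive value closes it, so a run reaching the last index is silently dropped), while B returns it like any other run, which is the intended segmentation. — e.g. on cut([], [1, 1, 1, 1]): A returns [], B returns [(0, 3)]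
import Mathlib
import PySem

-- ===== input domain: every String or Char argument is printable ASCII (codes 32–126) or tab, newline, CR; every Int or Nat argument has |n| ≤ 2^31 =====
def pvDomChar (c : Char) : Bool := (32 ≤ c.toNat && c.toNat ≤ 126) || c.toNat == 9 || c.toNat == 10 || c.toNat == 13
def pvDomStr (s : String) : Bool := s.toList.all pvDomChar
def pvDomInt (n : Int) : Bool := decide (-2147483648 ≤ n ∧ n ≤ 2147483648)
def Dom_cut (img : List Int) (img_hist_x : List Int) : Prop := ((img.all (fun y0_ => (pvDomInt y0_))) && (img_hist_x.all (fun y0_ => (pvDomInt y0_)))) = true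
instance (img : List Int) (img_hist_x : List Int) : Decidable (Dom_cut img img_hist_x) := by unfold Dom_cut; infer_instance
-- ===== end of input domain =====

-- B replaces A's stateful in_char scan by collecting positive indices, grouping them into
-- maximal consecutive runs and filtering by length (objective: simpler decomposition); it
-- intentionally also returns a long positive run reaching the last index, which A drops.
-- ===== PORT A =====
def cutGo : List Int → Int → Option Int → List (Int × Int) → List (Int × Int)
  | [], _, _, chars => chars
  | v :: rest, x, some s, chars =>
      if v > 0 then cutGo rest (x + 1) (some s) chars
      else cutGo rest (x + 1) none
        (if (x - 1) - s > 2 then chars ++ [(s, x - 1)] else chars)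
  | v :: rest, x, none, chars =>
      if v > 0 then cutGo rest (x + 1) (some x) chars
      else cutGo rest (x + 1) none chars

def cut (img : List Int) (img_hist_x : List Int) : List (Int × Int) :=
  cutGo img_hist_x 0 none []

-- ===== PORT B =====
-- positive indices of the histogram (the enumerate-comprehension of Source B)
def posIdx : Int → List Int → List Int
  | _, [] => []
  | x, v :: r => if v > 0 then x :: posIdx (x + 1) r else posIdx (x + 1) r

-- grouping loop of Source B: extend the current (s, e) run while indices stay consecutive
def grp (s e : Int) : List Int → List (Int × Int)
  | [] => [(s, e)]
  | j :: js => if j = e + 1 then grp s j js else (s, e) :: grp j j js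

def groupsOf : List Int → List (Int × Int)
  | [] => []
  | i :: is => grp i i is

def cut_alt (img : List Int) (img_hist_x : List Int) : List (Int × Int) :=
  (groupsOf (posIdx 0 img_hist_x)).filter (fun p => p.2 - p.1 > 2)

-- ===== PRECONDITION & SPEC =====
-- When the histogram ends with a positive run of length >= 4, A returns the list without
-- that final character (its scan only records a run when a later non-positive value closes
-- it, so a run reaching the last index is silently dropped), while B returns it like any
-- other run, which is the intended segmentation.
def D_cut (img : List Int) (img_hist_x : List Int) : Prop :=
  4 ≤ (img_hist_x.reverse.takeWhile (fun v => decide (0 < v))).length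
instance (img : List Int) (img_hist_x : List Int) : Decidable (D_cut img img_hist_x) := by unfold D_cut; infer_instance

def Spec_cut (img : List Int) (img_hist_x : List Int) (out : List (Int × Int)) : Prop := ¬ D_cut img img_hist_x → out = cut_alt img img_hist_x
instance (img : List Int) (img_hist_x : List Int) (out : List (Int × Int)) : Decidable (Spec_cut img img_hist_x out) := by unfold Spec_cut; infer_instance

def pvDiffWitness_cut : List Int × List Int := ([], [1, 1, 1, 1])
def pvDiffWitnessOut_cut : (List (Int × Int)) × (List (Int × Int)) := ([], [(0, 3)])

-- ===== CLAIM (what is proved, stated in full; the proofs are below) =====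
def Claim_unchanged_cut : Prop := ∀ (img : List Int) (img_hist_x : List Int), Dom_cut img img_hist_x → Spec_cut img img_hist_x (cut img img_hist_x)
def Claim_changed_cut : Prop := Dom_cut (pvDiffWitness_cut.1) (pvDiffWitness_cut.2) ∧ D_cut (pvDiffWitness_cut.1) (pvDiffWitness_cut.2) ∧ cut (pvDiffWitness_cut.1) (pvDiffWitness_cut.2) = pvDiffWitnessOut_cut.1 ∧ cut_alt (pvDiffWitness_cut.1) (pvDiffWitness_cut.2) = pvDiffWitnessOut_cut.2 ∧ pvDiffWitnessOut_cut.1 ≠ pvDiffWitnessOut_cut.2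
def Claim_exact_cut : Prop := ∀ (img : List Int) (img_hist_x : List Int), Dom_cut img img_hist_x → D_cut img img_hist_x → cut img img_hist_x ≠ cut_alt img img_hist_x

-- ===== LEMMAS AND PROOFS =====

-- trailing run of positive values, computed from the front (proof-side mirror of D_cut)
def trailLen : List Int → Nat
  | [] => 0
  | v :: r => if 0 < v ∧ trailLen r = r.length then r.length + 1 else trailLen r

lemma trailLen_le (l : List Int) : trailLen l ≤ l.length := by
  induction l with
  | nil => simp [trailLen]
  | cons v r ih => by_cases h : 0 < v ∧ trailLen r = r.length <;> simp [trailLen, h] <;> omega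

lemma trailLen_cons_all (v : Int) (r : List Int) (hv : v > 0) (hall : trailLen r = r.length) :
    trailLen (v :: r) = r.length + 1 := by
  simp [trailLen, hv, hall]

lemma trailLen_cons_rest (v : Int) (r : List Int) (h : ¬ (v > 0 ∧ trailLen r = r.length)) :
    trailLen (v :: r) = trailLen r := by
  simp only [trailLen, if_neg (by exact_mod_cast h)]

lemma trailLen_eq (l : List Int) :
    trailLen l = (l.reverse.takeWhile (fun v => decide (0 < v))).length := by
  induction l with
  | nil => simp [trailLen]
  | cons v r ih =>
    rw [List.reverse_cons, List.takeWhile_append]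
    by_cases hall : trailLen r = r.length
    · rw [if_pos (by rw [← ih, List.length_reverse]; exact hall)]
      by_cases hv : v > 0
      · rw [trailLen_cons_all v r hv hall]
        simp [List.takeWhile, hv]
      · rw [trailLen_cons_rest v r (by tauto), hall]
        simp [List.takeWhile, hv]
    · rw [if_neg (by rw [← ih, List.length_reverse]; exact hall), ← ih]
      exact trailLen_cons_rest v r (by tauto)

-- accumulator lemma for A's loop state
lemma cutGo_acc (rest : List Int) (x : Int) (st : Option Int) (acc : List (Int × Int)) :
    cutGo rest x st acc = acc ++ cutGo rest x st [] := by
  induction rest generalizing x st acc with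
  | nil => cases st <;> simp [cutGo]
  | cons v r ih =>
    cases st with
    | none =>
      by_cases h : v > 0 <;> simp [cutGo, h] <;>
        rw [ih, ih _ _ []]
    | some s =>
      by_cases h : v > 0 <;> simp [cutGo, h]
      · rw [ih, ih _ _ []]
      · by_cases h2 : (x - 1) - s > 2
        · simp only [if_pos h2]
          rw [ih _ _ (acc ++ [(s, x - 1)]), ih _ _ [(s, x - 1)]]
          simp
        · simp only [if_neg h2]
          exact ih _ _ _

lemma posIdx_ge (l : List Int) (x j : Int) (hj : j ∈ posIdx x l) : x ≤ j := by
  induction l generalizing x with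
  | nil => simp [posIdx] at hj
  | cons v r ih =>
    by_cases h : v > 0 <;> simp [posIdx, h] at hj
    · rcases hj with rfl | hj
      · exact le_refl _
      · linarith [ih (x + 1) hj]
    · linarith [ih (x + 1) hj]

lemma grp_split (s e : Int) (l : List Int) (h : ∀ j ∈ l, e + 1 < j) :
    grp s e l = (s, e) :: groupsOf l := by
  cases l with
  | nil => simp [grp, groupsOf]
  | cons j js =>
    have : ¬ (j = e + 1) := by have := h j (by simp); omega
    simp [grp, groupsOf, this]

-- side condition for the open-run state of A's scan
def condB (s x : Int) (rest : List Int) : Prop :=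
  if trailLen rest = rest.length then x + (rest.length : Int) - 1 - s ≤ 2 else trailLen rest ≤ 3

lemma cut_main (rest : List Int) (x : Int) :
    (trailLen rest ≤ 3 →
      cutGo rest x none [] = (groupsOf (posIdx x rest)).filter (fun p => p.2 - p.1 > 2)) ∧
    (∀ s : Int, condB s x rest →
      cutGo rest x (some s) [] = (grp s (x - 1) (posIdx x rest)).filter (fun p => p.2 - p.1 > 2)) := by
  induction rest generalizing x with
  | nil =>
    constructor
    · intro _; simp [cutGo, posIdx, groupsOf]
    · intro s hs
      simp [condB, trailLen] at hs
      simp [cutGo, posIdx, grp]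
      omega
  | cons v r ih =>
    have hle := trailLen_le r
    constructor
    · intro h
      by_cases hv : v > 0
      · have hc : condB x (x + 1) r := by
          unfold condB
          by_cases hall : trailLen r = r.length
          · rw [if_pos hall]
            rw [trailLen_cons_all v r hv hall] at h
            omega
          · rw [if_neg hall]
            rw [trailLen_cons_rest v r (by tauto)] at h
            omega
        have h2 := (ih (x + 1)).2 x hc
        rw [show ((x + 1) - 1 : Int) = x from by omega] at h2
        simp only [cutGo, if_pos hv, posIdx, groupsOf]
        exact h2
      · have h' : trailLen r ≤ 3 := by
          rw [trailLen_cons_rest v r (by tauto)] at h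
          exact h
        have := (ih (x + 1)).1 h'
        simp only [cutGo, if_neg hv, posIdx, groupsOf]
        exact this
    · intro s hs
      by_cases hv : v > 0
      · have hc : condB s (x + 1) r := by
          unfold condB
          unfold condB at hs
          by_cases hall : trailLen r = r.length
          · rw [if_pos hall]
            have hT : trailLen (v :: r) = (v :: r).length := by
              rw [trailLen_cons_all v r hv hall, List.length_cons]
            rw [if_pos hT] at hs
            simp only [List.length_cons] at hs
            push_cast at hs ⊢
            omega
          · rw [if_neg hall]
            have hT2 : ¬ trailLen (v :: r) = (v :: r).length := by
              rw [trailLen_cons_rest v r (by tauto), List.length_cons]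
              omega
            rw [if_neg hT2] at hs
            rw [trailLen_cons_rest v r (by tauto)] at hs
            exact hs
        have h2 := (ih (x + 1)).2 s hc
        rw [show ((x + 1) - 1 : Int) = x from by omega] at h2
        simp only [cutGo, if_pos hv, posIdx]
        rw [grp, if_pos (by omega : x = (x - 1) + 1)]
        exact h2
      · have h' : trailLen r ≤ 3 := by
          have hT2 : ¬ trailLen (v :: r) = (v :: r).length := by
            rw [trailLen_cons_rest v r (by tauto), List.length_cons]
            omega
          unfold condB at hs
          rw [if_neg hT2] at hs
          rw [trailLen_cons_rest v r (by tauto)] at hs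
          exact hs
        have hsplit : grp s (x - 1) (posIdx (x + 1) r) = (s, x - 1) :: groupsOf (posIdx (x + 1) r) :=
          grp_split _ _ _ (fun j hj => by have := posIdx_ge r (x + 1) j hj; omega)
        simp only [cutGo, if_neg hv, posIdx]
        rw [cutGo_acc, hsplit, List.filter_cons]
        by_cases h2 : (x - 1) - s > 2 <;>
          simp [h2, (ih (x + 1)).1 h']

-- side condition for the open-run state in the tightness argument
def condT (s x : Int) (rest : List Int) : Prop :=
  if trailLen rest = rest.length then x + (rest.length : Int) - 1 - s > 2 else 4 ≤ trailLen rest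

lemma cut_mem (rest : List Int) (x : Int) :
    (4 ≤ trailLen rest →
      ∃ s, (s, x + (rest.length : Int) - 1) ∈
        (groupsOf (posIdx x rest)).filter (fun p => p.2 - p.1 > 2)) ∧
    (∀ s0 : Int, condT s0 x rest →
      ∃ s, (s, x + (rest.length : Int) - 1) ∈
        (grp s0 (x - 1) (posIdx x rest)).filter (fun p => p.2 - p.1 > 2)) := by
  induction rest generalizing x with
  | nil =>
    constructor
    · intro h; simp [trailLen] at h
    · intro s0 hs
      simp [condT, trailLen] at hs
      refine ⟨s0, ?_⟩
      simp [posIdx, grp]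
      omega
  | cons v r ih =>
    have hle := trailLen_le r
    have hlen : x + ((v :: r).length : Int) - 1 = (x + 1) + (r.length : Int) - 1 := by
      simp only [List.length_cons]; push_cast; ring
    constructor
    · intro h
      rw [hlen]
      by_cases hv : v > 0
      · have hc : condT x (x + 1) r := by
          unfold condT
          by_cases hall : trailLen r = r.length
          · rw [if_pos hall]
            rw [trailLen_cons_all v r hv hall] at h
            omega
          · rw [if_neg hall]
            rw [trailLen_cons_rest v r (by tauto)] at h
            omega
        obtain ⟨s, hsmem⟩ := (ih (x + 1)).2 x hc
        rw [show ((x + 1) - 1 : Int) = x from by omega] at hsmem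
        refine ⟨s, ?_⟩
        simp only [posIdx, if_pos hv, groupsOf]
        exact hsmem
      · have h' : 4 ≤ trailLen r := by
          rw [trailLen_cons_rest v r (by tauto)] at h
          exact h
        obtain ⟨s, hsmem⟩ := (ih (x + 1)).1 h'
        refine ⟨s, ?_⟩
        simp only [posIdx, if_neg hv]
        exact hsmem
    · intro s0 hs
      rw [hlen]
      by_cases hv : v > 0
      · have hc : condT s0 (x + 1) r := by
          unfold condT
          unfold condT at hs
          by_cases hall : trailLen r = r.length
          · rw [if_pos hall]
            have hT : trailLen (v :: r) = (v :: r).length := by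
              rw [trailLen_cons_all v r hv hall, List.length_cons]
            rw [if_pos hT] at hs
            simp only [List.length_cons] at hs
            push_cast at hs ⊢
            omega
          · rw [if_neg hall]
            have hT2 : ¬ trailLen (v :: r) = (v :: r).length := by
              rw [trailLen_cons_rest v r (by tauto), List.length_cons]
              omega
            rw [if_neg hT2] at hs
            rw [trailLen_cons_rest v r (by tauto)] at hs
            exact hs
        obtain ⟨s, hsmem⟩ := (ih (x + 1)).2 s0 hc
        rw [show ((x + 1) - 1 : Int) = x from by omega] at hsmem
        refine ⟨s, ?_⟩
        simp only [posIdx, if_pos hv]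
        rw [grp, if_pos (by omega : x = (x - 1) + 1)]
        exact hsmem
      · have h' : 4 ≤ trailLen r := by
          have hT2 : ¬ trailLen (v :: r) = (v :: r).length := by
            rw [trailLen_cons_rest v r (by tauto), List.length_cons]
            omega
          unfold condT at hs
          rw [if_neg hT2] at hs
          rw [trailLen_cons_rest v r (by tauto)] at hs
          exact hs
        obtain ⟨s, hsmem⟩ := (ih (x + 1)).1 h'
        refine ⟨s, ?_⟩
        have hsplit : grp s0 (x - 1) (posIdx (x + 1) r) = (s0, x - 1) :: groupsOf (posIdx (x + 1) r) :=
          grp_split _ _ _ (fun j hj => by have := posIdx_ge r (x + 1) j hj; omega)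
        simp only [posIdx, if_neg hv]
        rw [hsplit, List.filter_cons]
        by_cases h2 : (x : Int) - 1 - s0 > 2
        · rw [if_pos (by simp [h2])]
          exact List.mem_cons_of_mem _ hsmem
        · rw [if_neg (by simp [h2])]
          exact hsmem

-- members of A's result never end at the last index
lemma cut_snd_ne (rest : List Int) (x n : Int) (hn : x + (rest.length : Int) = n)
    (st : Option Int) (hst : ∀ s, st = some s → s ≤ x - 1) :
    ∀ p ∈ cutGo rest x st [], p.2 ≠ n - 1 := by
  induction rest generalizing x st with
  | nil =>
    cases st <;> simp [cutGo]
  | cons v r ih =>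
    have hn' : (x + 1) + (r.length : Int) = n := by
      simp only [List.length_cons] at hn; push_cast at hn; omega
    cases st with
    | none =>
      by_cases hv : v > 0
      · simp only [cutGo, if_pos hv]
        exact ih (x + 1) hn' (some x) (by intro s hs; cases hs; omega)
      · simp only [cutGo, if_neg hv]
        exact ih (x + 1) hn' none (by simp)
    | some s =>
      by_cases hv : v > 0
      · simp only [cutGo, if_pos hv]
        exact ih (x + 1) hn' (some s) (by intro s' hs'; cases hs'; have := hst s rfl; omega)
      · simp only [cutGo, if_neg hv]
        intro p hp
        rw [cutGo_acc] at hp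
        rcases List.mem_append.1 hp with hp | hp
        · by_cases h2 : x - 1 - s > 2
          · rw [if_pos h2] at hp
            simp at hp
            rw [hp]
            simp
            omega
          · rw [if_neg h2] at hp
            simp at hp
        · exact ih (x + 1) hn' none (by simp) p hp

-- ===== VERDICT (by name: the statement is the Claim_ definition above) =====
theorem cut_spec : Claim_unchanged_cut := by
  intro img img_hist_x _ hD
  show cut img img_hist_x = cut_alt img img_hist_x
  have ht : trailLen img_hist_x ≤ 3 := by
    rw [trailLen_eq]
    unfold D_cut at hD
    omega
  unfold cut cut_alt
  exact (cut_main img_hist_x 0).1 ht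

theorem cut_changed : Claim_changed_cut := by unfold Claim_changed_cut; decide

theorem cut_tight : Claim_exact_cut := by
  intro img img_hist_x _ hD heq
  have ht : 4 ≤ trailLen img_hist_x := by
    rw [trailLen_eq]; exact hD
  obtain ⟨s, hmem⟩ := (cut_mem img_hist_x 0).1 ht
  rw [show ((0 : Int) + (img_hist_x.length : Int) - 1) = (img_hist_x.length : Int) - 1 from by omega] at hmem
  have hA := cut_snd_ne img_hist_x 0 (img_hist_x.length : Int) (by simp) none (by simp)
  have : (s, (img_hist_x.length : Int) - 1) ∈ cut img img_hist_x := by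
    rw [heq]; exact hmem
  exact hA _ this rfl
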